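-- pv_equiv track=rewrite | github.com/mynameisgrass/cio | ml/scripts/run_pipeline.py | split_ranges
-- ===== SOURCE A (Python) =====
-- def split_ranges(total: int, shards: int) -> list[tuple[int, int]]:
--     shards = max(1, shards)
--     if total <= 0:
--         return []
--
--     base = total // shards
--     remainder = total % shards
--
--     ranges: list[tuple[int, int]] = []
--     start = 0
--     for shard_idx in range(shards):
--         size = base + (1 if shard_idx < remainder else 0)
--         end = start + size
--         if start < end:
--             ranges.append((start, end))
--         start = end
--
--     return ranges
-- ===== SOURCE B (Python) =====
-- def split_ranges(total: int, shards: int) -> list[tuple[int, int]]: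
--     shards = max(1, shards)
--     if total <= 0:
--         return []
--     base, rem = divmod(total, shards)
--     def bound(i: int) -> int:
--         return i * base + min(i, rem)
--     return [(bound(i), bound(i + 1)) for i in range(min(total, shards))]
-- ===== Notes on version B (the rewrite author's own statement) =====
-- stated objective: alternative
-- what changed: Replaced the running start/end accumulator loop with a conditional append by a direct comprehension over the exact number of non-empty shards min(total, shards), computing each boundary in closed form as i*base + min(i, rem).
import Mathlib
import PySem

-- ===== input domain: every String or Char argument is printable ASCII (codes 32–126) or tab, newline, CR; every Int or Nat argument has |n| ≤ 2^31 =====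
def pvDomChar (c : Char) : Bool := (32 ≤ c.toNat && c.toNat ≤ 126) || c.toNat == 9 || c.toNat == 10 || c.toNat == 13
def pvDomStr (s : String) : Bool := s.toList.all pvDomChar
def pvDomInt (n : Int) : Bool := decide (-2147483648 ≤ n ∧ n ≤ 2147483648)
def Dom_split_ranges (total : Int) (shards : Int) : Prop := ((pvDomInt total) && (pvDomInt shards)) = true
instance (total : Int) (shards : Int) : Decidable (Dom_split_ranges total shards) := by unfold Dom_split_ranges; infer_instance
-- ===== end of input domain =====

-- B replaces A's running start/end accumulator and conditional append by a direct
-- comprehension over the exact number of non-empty shards, with closed-form boundaries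
-- (objective: alternative decomposition, same cost).

-- ===== PORT A =====
def split_ranges (total : Int) (shards : Int) : List (Int × Int) :=
  let s := max 1 shards
  if total ≤ 0 then []
  else
    let base := PySem.Int.floordiv total s
    let rem := PySem.Int.mod total s
    let p := (PySem.List.pyRange 0 s 1).foldl
      (fun (st : List (Int × Int) × Int) shard_idx =>
        let size := base + (if shard_idx < rem then (1 : Int) else 0)
        let e := st.2 + size
        (if st.2 < e then st.1 ++ [(st.2, e)] else st.1, e))
      ([], 0)
    p.1

-- ===== PORT B =====
def split_ranges_alt (total : Int) (shards : Int) : List (Int × Int) :=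
  let s := max 1 shards
  if total ≤ 0 then []
  else
    let base := PySem.Int.floordiv total s
    let rem := PySem.Int.mod total s
    let bound : Int → Int := fun i => i * base + min i rem
    (PySem.List.pyRange 0 (min total s) 1).map (fun i => (bound i, bound (i + 1)))

-- ===== PRECONDITION & SPEC =====
def Spec_split_ranges (total : Int) (shards : Int) (out : List (Int × Int)) : Prop := out = split_ranges_alt total shards
instance (total : Int) (shards : Int) (out : List (Int × Int)) : Decidable (Spec_split_ranges total shards out) := by unfold Spec_split_ranges; infer_instance

-- ===== CLAIM (what is proved, stated in full; the proofs are below) =====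
def Claim_equal_split_ranges : Prop := ∀ (total : Int) (shards : Int), Dom_split_ranges total shards → Spec_split_ranges total shards (split_ranges total shards)

-- ===== LEMMAS AND PROOFS =====

/-- Loop invariant for A's fold: starting the loop at index `k` with running start
`k*base + min k rem` appends exactly the closed-form ranges for indices in `[min k n, n)`. -/
theorem sr_loop (base rem n s : Int)
    (hns : n ≤ s)
    (hcond : ∀ i : Int, 0 ≤ i → i < s →
      (0 < base + (if i < rem then (1 : Int) else 0) ↔ i < n)) :
    ∀ (t : Nat) (k : Int) (L : List (Int × Int)), 0 ≤ k → k = s - t →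
    ((PySem.List.pyRange k s 1).foldl
      (fun (st : List (Int × Int) × Int) shard_idx =>
        (if st.2 < st.2 + (base + (if shard_idx < rem then (1 : Int) else 0)) then
            st.1 ++ [(st.2, st.2 + (base + (if shard_idx < rem then (1 : Int) else 0)))]
          else st.1,
          st.2 + (base + (if shard_idx < rem then (1 : Int) else 0))))
      (L, k * base + min k rem)).1
    = L ++ (PySem.List.pyRange (min k n) n 1).map
        (fun i => (i * base + min i rem, (i + 1) * base + min (i + 1) rem)) := by
  intro t
  induction t with
  | zero =>
      intro k L hk0 hk
      have hks : k = s := by omega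
      have h1 : PySem.List.pyRange k s 1 = [] := PySem.List.pyRange_one_eq_nil (by omega)
      have h2 : min k n = n := by omega
      have h3 : PySem.List.pyRange n n 1 = [] := PySem.List.pyRange_one_eq_nil (by omega)
      simp [h1, h2, h3]
  | succ t ih =>
      intro k L hk0 hk
      have hklt : k < s := by omega
      rw [PySem.List.pyRange_one_cons hklt]
      simp only [List.foldl_cons]
      have hstep : k * base + min k rem + (base + (if k < rem then (1 : Int) else 0))
          = (k + 1) * base + min (k + 1) rem := by
        have hmul : (k + 1) * base = k * base + base := by ring
        rw [hmul]
        generalize k * base = K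
        split_ifs with h <;> omega
      have hc := hcond k hk0 hklt
      by_cases hkn : k < n
      · have hsz : 0 < base + (if k < rem then (1 : Int) else 0) := hc.mpr hkn
        have hlt : k * base + min k rem < k * base + min k rem + (base + (if k < rem then (1 : Int) else 0)) := by omega
        simp only [hstep, if_pos (hstep ▸ hlt)]
        rw [ih (k + 1) (L ++ [(k * base + min k rem, (k + 1) * base + min (k + 1) rem)]) (by omega) (by omega)]
        have h4 : min (k + 1) n = k + 1 := by omega
        have h5 : min k n = k := by omega
        rw [h4, h5, PySem.List.pyRange_one_cons hkn]
        simp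
      · have hsz : ¬ 0 < base + (if k < rem then (1 : Int) else 0) := fun h => hkn (hc.mp h)
        have hlt : ¬ k * base + min k rem < k * base + min k rem + (base + (if k < rem then (1 : Int) else 0)) := by omega
        simp only [hstep, if_neg (hstep ▸ hlt)]
        rw [ih (k + 1) L (by omega) (by omega)]
        have h4 : min (k + 1) n = n := by omega
        have h5 : min k n = n := by omega
        rw [h4, h5]

-- ===== VERDICT (by name: the statement is the Claim_ definition above) =====
theorem split_ranges_spec : Claim_equal_split_ranges := by
  intro total shards _
  unfold Spec_split_ranges split_ranges split_ranges_alt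
  by_cases h : total ≤ 0
  · simp [h]
  · simp only [if_neg h]
    set s : Int := max 1 shards with hs_def
    have hs : 0 < s := by positivity
    set base : Int := PySem.Int.floordiv total s with hbase_def
    set rem : Int := PySem.Int.mod total s with hrem_def
    have hdm : base * s + rem = total := PySem.Int.floordiv_mul_add_mod total s
    have hrem0 : 0 ≤ rem := by
      rw [hrem_def, PySem.Int.mod_eq_emod_of_pos hs]
      exact Int.emod_nonneg _ (by omega)
    have hrems : rem < s := by
      rw [hrem_def, PySem.Int.mod_eq_emod_of_pos hs]
      exact Int.emod_lt_of_pos _ hs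
    have hbase0 : 0 ≤ base := by
      rw [hbase_def, PySem.Int.floordiv_eq_ediv_of_pos hs]
      exact Int.ediv_nonneg (by omega) (by omega)
    set n : Int := min total s with hn_def
    have hns : n ≤ s := by omega
    have hn0 : 0 ≤ n := by omega
    have hcond : ∀ i : Int, 0 ≤ i → i < s →
        (0 < base + (if i < rem then (1 : Int) else 0) ↔ i < n) := by
      intro i hi0 his
      by_cases hb : base = 0
      · have htr : total = rem := by
          have : base * s = 0 := by rw [hb]; ring
          omega
        have hn' : n = rem := by omega
        split_ifs with h1 <;> omega
      · have hb1 : 1 ≤ base := by omega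
        have hts : s ≤ total := by nlinarith
        have hn' : n = s := by omega
        split_ifs with h1 <;> omega
    have hfold := sr_loop base rem n s hns hcond s.toNat 0 [] (le_refl 0) (by omega)
    have h00 : (0 : Int) * base + min 0 rem = 0 := by
      simp [min_eq_left hrem0]
    have hmin0 : min (0 : Int) n = 0 := by omega
    rw [h00, hmin0] at hfold
    rw [hfold]
    simp [hn_def]
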